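-- pv_equiv track=rewrite | github.com/apurvv28/samayvidya | backend/app/services/timetable_orchestrator.py | _is_gapless_day_pattern
-- ===== SOURCE A (Python) =====
-- def _is_gapless_day_pattern(slot_orders: set[int], lunch_slot_order: int | None) -> bool:
--     """Validate no-gap day pattern with conditional 12:00-13:00 lunch break.
--
--     Rule:
--     - If total scheduled hours for a day are > 4, lunch slot (12:00-13:00) must be free.
--     - Otherwise lunch slot can be used.
--     - No internal gaps are allowed (except the lunch gap when the >4 rule applies).
--     """
--     if not slot_orders:
--         return True
--
--     sorted_orders = sorted(slot_orders)
--     total_hours = len(sorted_orders)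
--
--     if lunch_slot_order is not None and total_hours > 4:
--         if lunch_slot_order in slot_orders:
--             return False
--
--         left = [order for order in sorted_orders if order < lunch_slot_order]
--         right = [order for order in sorted_orders if order > lunch_slot_order]
--
--         if left and left != list(range(left[0], left[-1] + 1)):
--             return False
--         if right and right != list(range(right[0], right[-1] + 1)):
--             return False
--         return True
--
--     return sorted_orders == list(range(sorted_orders[0], sorted_orders[-1] + 1))
-- ===== SOURCE B (Python) =====
-- def _is_gapless_day_pattern(slot_orders: set[int], lunch_slot_order: int | None) -> bool:
--     """Run-counting reimplementation: an element x is a 'run end' iff x + 1 is not in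
--     the set; a nonempty set of distinct ints is contiguous iff it has exactly one run
--     end. The lunch branch counts run ends strictly below / strictly above the lunch
--     slot (each side contiguous iff it has at most one run end). One membership pass,
--     no sorting and no range-list construction."""
--     if not slot_orders:
--         return True
--     if lunch_slot_order is not None and len(slot_orders) > 4:
--         if lunch_slot_order in slot_orders:
--             return False
--         low_ends = sum(1 for x in slot_orders if x < lunch_slot_order and x + 1 not in slot_orders)
--         high_ends = sum(1 for x in slot_orders if x > lunch_slot_order and x + 1 not in slot_orders)
--         return low_ends <= 1 and high_ends <= 1
--     return sum(1 for x in slot_orders if x + 1 not in slot_orders) == 1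
-- ===== Notes on version B (the rewrite author's own statement) =====
-- stated objective: alternative
-- what changed: Replaces sort + explicit range-list construction and list comparison with run counting via successor membership: one pass counts elements x with x+1 not in the set (at most one run end per side of the lunch slot, exactly one overall); no sorting and no materialised range lists.
import Mathlib
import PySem

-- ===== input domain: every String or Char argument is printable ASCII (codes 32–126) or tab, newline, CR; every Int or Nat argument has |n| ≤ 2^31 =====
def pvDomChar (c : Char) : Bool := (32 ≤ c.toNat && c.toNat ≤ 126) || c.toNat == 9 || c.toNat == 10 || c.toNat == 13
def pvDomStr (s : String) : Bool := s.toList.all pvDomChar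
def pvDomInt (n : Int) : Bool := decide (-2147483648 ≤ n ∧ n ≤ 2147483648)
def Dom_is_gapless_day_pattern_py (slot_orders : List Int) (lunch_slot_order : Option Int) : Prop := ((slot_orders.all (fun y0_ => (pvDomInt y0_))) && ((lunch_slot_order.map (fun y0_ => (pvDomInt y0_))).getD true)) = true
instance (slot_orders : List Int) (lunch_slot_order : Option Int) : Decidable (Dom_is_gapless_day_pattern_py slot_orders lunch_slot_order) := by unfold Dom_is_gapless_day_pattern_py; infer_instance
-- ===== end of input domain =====

-- B replaces A's sort + range-list comparisons by run counting via successor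
-- membership (x is a run end iff x+1 ∉ set); return value only, no mutation.

-- ===== PORT A =====
def is_gapless_day_pattern_py (slot_orders : List Int) (lunch_slot_order : Option Int) : Bool :=
  if slot_orders.isEmpty then true
  else
    let sorted_orders := PySem.List.sorted slot_orders (fun x => x) false
    let total_hours : Int := PySem.List.len sorted_orders
    match lunch_slot_order with
    | some lso =>
      if total_hours > 4 then
        if slot_orders.contains lso then false
        else
          let left := sorted_orders.filter (fun o => o < lso)
          let right := sorted_orders.filter (fun o => lso < o)
          if left != [] && left != PySem.List.pyRange left.head! (left.getLast! + 1) 1 then false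
          else if right != [] && right != PySem.List.pyRange right.head! (right.getLast! + 1) 1 then false
          else true
      else
        sorted_orders == PySem.List.pyRange sorted_orders.head! (sorted_orders.getLast! + 1) 1
    | none =>
      sorted_orders == PySem.List.pyRange sorted_orders.head! (sorted_orders.getLast! + 1) 1

-- ===== PORT B =====
def is_gapless_day_pattern_py_alt (slot_orders : List Int) (lunch_slot_order : Option Int) : Bool :=
  if slot_orders.isEmpty then true
  else
    match lunch_slot_order with
    | some lso =>
      if (PySem.List.len slot_orders : Int) > 4 then
        if slot_orders.contains lso then false
        else
          -- sum(1 for x in S if x < lso and x+1 not in S), and the > lso twin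
          let low_ends := slot_orders.countP (fun x => x < lso && !(slot_orders.contains (x + 1)))
          let high_ends := slot_orders.countP (fun x => lso < x && !(slot_orders.contains (x + 1)))
          decide (low_ends ≤ 1) && decide (high_ends ≤ 1)
      else
        slot_orders.countP (fun x => !(slot_orders.contains (x + 1))) == 1
    | none =>
      slot_orders.countP (fun x => !(slot_orders.contains (x + 1))) == 1

-- ===== PRECONDITION & SPEC =====
-- Pre_ is the representation invariant of the Python argument: slot_orders is a
-- set[int], so its List model holds distinct elements (no inputs A accepts are excluded).
def Pre_is_gapless_day_pattern_py (slot_orders : List Int) (lunch_slot_order : Option Int) : Prop :=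
  slot_orders.Nodup
instance (slot_orders : List Int) (lunch_slot_order : Option Int) : Decidable (Pre_is_gapless_day_pattern_py slot_orders lunch_slot_order) := by unfold Pre_is_gapless_day_pattern_py; infer_instance
def pvWitness_is_gapless_day_pattern_py : List Int × Option Int := ([5, 6, 9, 10, 11], some 8)

def Spec_is_gapless_day_pattern_py (slot_orders : List Int) (lunch_slot_order : Option Int) (out : Bool) : Prop := out = is_gapless_day_pattern_py_alt slot_orders lunch_slot_order
instance (slot_orders : List Int) (lunch_slot_order : Option Int) (out : Bool) : Decidable (Spec_is_gapless_day_pattern_py slot_orders lunch_slot_order out) := by unfold Spec_is_gapless_day_pattern_py; infer_instance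

-- ===== CLAIM (what is proved, stated in full; the proofs are below) =====
def Claim_equal_is_gapless_day_pattern_py : Prop := ∀ (slot_orders : List Int) (lunch_slot_order : Option Int), Dom_is_gapless_day_pattern_py slot_orders lunch_slot_order → Pre_is_gapless_day_pattern_py slot_orders lunch_slot_order → Spec_is_gapless_day_pattern_py slot_orders lunch_slot_order (is_gapless_day_pattern_py slot_orders lunch_slot_order)

-- ===== LEMMAS AND PROOFS =====

-- number of maximal runs of consecutive integers in a strictly sorted list
def runCount : List Int → Nat
  | [] => 0
  | [_] => 1
  | a :: b :: s => (if b = a + 1 then 0 else 1) + runCount (b :: s)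

theorem runCount_eq_zero {l : List Int} : runCount l = 0 ↔ l = [] := by
  induction l with
  | nil => simp [runCount]
  | cons a t ih =>
    cases t with
    | nil => simp [runCount]
    | cons b s =>
      simp only [runCount, List.cons_ne_nil, iff_false]
      intro h
      have h1 : runCount (b :: s) = 0 := by omega
      exact (List.cons_ne_nil b s) (ih.mp h1)

theorem pv_le_getLast {l : List Int} (hp : l.Pairwise (· < ·)) {a : Int} (ha : a ∈ l)
    (h : l ≠ []) : a ≤ l.getLast h := by
  induction l with
  | nil => simp at ha
  | cons x t ih =>
    rcases List.mem_cons.mp ha with rfl | hat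
    · cases t with
      | nil => simp [List.getLast]
      | cons y s =>
        have hx : a < (y::s).getLast (by simp) :=
          (List.pairwise_cons.mp hp).1 _ (List.getLast_mem (by simp))
        rw [List.getLast_cons (by simp)]
        exact le_of_lt hx
    · have ht : t ≠ [] := List.ne_nil_of_mem hat
      rw [List.getLast_cons ht]
      exact ih (List.Pairwise.of_cons hp) hat ht

theorem pv_getLast!_eq {l : List Int} (h : l ≠ []) : l.getLast! = l.getLast h := by
  rw [List.getLast!_eq_getLast?_getD, List.getLast?_eq_some_getLast h]
  rfl

-- the successor-membership count over a strictly sorted list is its run count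
theorem countP_runEnds {l : List Int} (hp : l.Pairwise (· < ·)) :
    l.countP (fun x => !(l.contains (x + 1))) = runCount l := by
  induction l with
  | nil => simp [runCount]
  | cons a t ih =>
    have ha : ∀ x ∈ t, a < x := (List.pairwise_cons.mp hp).1
    have hstep : t.countP (fun x => !((a :: t).contains (x + 1)))
        = t.countP (fun x => !(t.contains (x + 1))) := by
      apply List.countP_congr
      intro x hx
      have hax := ha x hx
      have hiff : (x + 1 = a ∨ x + 1 ∈ t) ↔ (x + 1 ∈ t) := by
        constructor
        · rintro (h | h)
          · omega
          · exact h
        · exact Or.inr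
      simp [List.contains_eq_mem, hiff]
    cases t with
    | nil => simp [runCount, List.countP_cons]
    | cons b s =>
      have hbs : ∀ y ∈ s, b < y := (List.pairwise_cons.mp (List.Pairwise.of_cons hp)).1
      have hab : a < b := ha b List.mem_cons_self
      have hmem : (a + 1 ∈ a :: b :: s) ↔ b = a + 1 := by
        constructor
        · intro h
          rcases List.mem_cons.mp h with h | h
          · omega
          rcases List.mem_cons.mp h with h | h
          · omega
          · have := hbs _ h
            omega
        · intro h
          exact List.mem_cons.mpr (Or.inr (List.mem_cons.mpr (Or.inl h.symm)))
      have hpa : (!((a :: b :: s).contains (a + 1))) = !(decide (b = a + 1)) := by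
        simp [List.contains_eq_mem, hmem]
      rw [List.countP_cons, hstep, ih (List.Pairwise.of_cons hp), hpa]
      simp only [runCount]
      by_cases hb : b = a + 1 <;> simp [hb] <;> omega

-- a strictly sorted nonempty list equals its full range iff it is a single run
theorem range_iff_runCount_one {l : List Int} (hp : l.Pairwise (· < ·)) (hne : l ≠ []) :
    (l == PySem.List.pyRange l.head! (l.getLast! + 1) 1) = decide (runCount l = 1) := by
  induction l with
  | nil => exact absurd rfl hne
  | cons a t ih =>
    cases t with
    | nil =>
      simp [runCount, PySem.List.pyRange_one_singleton]
    | cons b s =>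
      have hp' := List.Pairwise.of_cons hp
      have hab : a < b := (List.pairwise_cons.mp hp).1 b List.mem_cons_self
      have hLdef := pv_getLast!_eq (l := a :: b :: s) (by simp)
      have hL' := pv_getLast!_eq (l := b :: s) (by simp)
      have hLeq : (a :: b :: s).getLast! = (b :: s).getLast! := by
        rw [hLdef, hL', List.getLast_cons (by simp)]
      have hbL : b ≤ (b :: s).getLast! := by
        rw [hL']
        exact pv_le_getLast hp' List.mem_cons_self (by simp)
      have hcons : PySem.List.pyRange a ((b :: s).getLast! + 1) 1
          = a :: PySem.List.pyRange (a + 1) ((b :: s).getLast! + 1) 1 :=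
        PySem.List.pyRange_one_cons (by omega)
      rw [List.head!_cons, hLeq, hcons]
      by_cases hb : b = a + 1
      · subst hb
        have ihr := ih hp' (by simp)
        rw [List.head!_cons] at ihr
        have hrc : runCount (a :: (a + 1) :: s) = runCount ((a + 1) :: s) := by
          simp [runCount]
        rw [hrc, ← ihr]
        simp [List.cons_beq_cons]
      · -- head mismatch: range starts at a+1 but the list continues with b ≠ a+1
        have hrange : PySem.List.pyRange (a + 1) ((b :: s).getLast! + 1) 1
            = (a + 1) :: PySem.List.pyRange (a + 1 + 1) ((b :: s).getLast! + 1) 1 :=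
          PySem.List.pyRange_one_cons (by omega)
        have hlhs : ((a :: b :: s) == a :: PySem.List.pyRange (a + 1) ((b :: s).getLast! + 1) 1) = false := by
          rw [hrange]
          simp only [List.cons_beq_cons, beq_self_eq_true, Bool.true_and]
          simp [hb]
        have hrc : runCount (a :: b :: s) ≠ 1 := by
          simp only [runCount, if_neg hb]
          have : runCount (b :: s) ≠ 0 := fun h => (by simp : b :: s ≠ []) (runCount_eq_zero.mp h)
          omega
        rw [hlhs]
        exact (decide_eq_false hrc).symm

-- A's guarded empty-or-range test equals B's "at most one run end" test
theorem side_iff_le_one {l : List Int} (hp : l.Pairwise (· < ·)) :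
    (!(l != [] && l != PySem.List.pyRange l.head! (l.getLast! + 1) 1))
      = decide (runCount l ≤ 1) := by
  by_cases hl : l = []
  · subst hl; simp [runCount]
  · have h1 := range_iff_runCount_one hp hl
    have h0 : runCount l ≠ 0 := fun h => hl (runCount_eq_zero.mp h)
    have hle : (runCount l ≤ 1) ↔ (runCount l = 1) := by omega
    have hne : (l == []) = false := by simp [hl]
    have hred : (!(l != [] && l != PySem.List.pyRange l.head! (l.getLast! + 1) 1))
        = (l == PySem.List.pyRange l.head! (l.getLast! + 1) 1) := by
      cases h : (l == PySem.List.pyRange l.head! (l.getLast! + 1) 1) <;>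
        simp only [bne, hne, h, Bool.not_false, Bool.not_true, Bool.true_and,
          Bool.and_false, Bool.and_true, Bool.not_not]
    rw [hred, h1, decide_eq_decide]
    exact hle.symm

theorem pv_sorted_strict {xs : List Int} (hnd : xs.Nodup) :
    (PySem.List.sorted xs (fun x => x) false).Pairwise (· < ·) := by
  have h1 : (PySem.List.sorted xs (fun x => x) false).Pairwise (· ≤ ·) := by
    simpa using PySem.List.sorted_pairwise xs (fun x => x)
  have h2 : (PySem.List.sorted xs (fun x => x) false).Nodup :=
    ((PySem.List.sorted_perm xs (fun x => x) false).nodup_iff).mpr hnd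
  exact (h1.and h2).imp (fun h => lt_of_le_of_ne h.1 h.2)

-- transfer a successor-membership count from the unsorted list to the sorted one
theorem countP_perm_contains {xs ys : List Int} (hperm : ys.Perm xs) (p : Int → Bool) :
    xs.countP (fun x => p x && !(xs.contains (x + 1)))
      = ys.countP (fun x => p x && !(ys.contains (x + 1))) := by
  rw [← hperm.countP_eq]
  apply List.countP_congr
  intro x _
  have : (ys.contains (x + 1)) = (xs.contains (x + 1)) := by
    simp only [List.contains_eq_mem, decide_eq_decide]
    exact hperm.mem_iff
  rw [this]

-- restrict a one-sided count over the whole sorted list to the filtered side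
theorem countP_side_eq {l : List Int} (q : Int → Bool)
    (hcl : ∀ x, q x → ((l.filter q).contains (x + 1)) = (l.contains (x + 1))) :
    l.countP (fun x => q x && !(l.contains (x + 1)))
      = (l.filter q).countP (fun x => !((l.filter q).contains (x + 1))) := by
  rw [List.countP_filter]
  apply List.countP_congr
  intro x _
  by_cases hq : q x = true
  · simp only [hq, Bool.true_and, Bool.and_true]
    rw [hcl x hq]
  · simp [hq]

-- ===== VERDICT (by name: the statement is the Claim_ definition above) =====
theorem is_gapless_day_pattern_py_spec : Claim_equal_is_gapless_day_pattern_py := by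
  intro xs lunch _ hpre
  unfold Pre_is_gapless_day_pattern_py at hpre
  unfold Spec_is_gapless_day_pattern_py
  unfold is_gapless_day_pattern_py is_gapless_day_pattern_py_alt
  by_cases hxs : xs = []
  · subst hxs; rfl
  · have hne : xs.isEmpty = false := by simp [hxs]
    have hsperm := PySem.List.sorted_perm xs (fun x => x) false
    have hstrict := pv_sorted_strict hpre
    set srt := PySem.List.sorted xs (fun x => x) false with hsrt
    have hsne : srt ≠ [] := by
      intro h
      rw [h] at hsperm
      exact hxs hsperm.nil_eq.symm
    have hlen : (PySem.List.len srt : Int) = (PySem.List.len xs : Int) := by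
      simp [PySem.List.len_eq, hsperm.length_eq]
    -- full-list bridge: A's range test on the sorted list = B's run-end count on xs
    have hfull : (srt == PySem.List.pyRange srt.head! (srt.getLast! + 1) 1)
        = (xs.countP (fun x => !(xs.contains (x + 1))) == 1) := by
      have h1 : xs.countP (fun x => !(xs.contains (x + 1)))
          = srt.countP (fun x => !(srt.contains (x + 1))) := by
        have := countP_perm_contains (xs := xs) (ys := srt) hsperm (fun _ => true)
        simpa using this
      rw [range_iff_runCount_one hstrict hsne, h1, countP_runEnds hstrict]
      by_cases hr : runCount srt = 1 <;> simp [hr]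
    simp only [hne, Bool.false_eq_true, if_false, hlen]
    cases lunch with
    | none => exact hfull
    | some lso =>
      dsimp only
      by_cases h4 : (PySem.List.len xs : Int) > 4
      · rw [if_pos h4, if_pos h4]
        by_cases hin : xs.contains lso = true
        · rw [if_pos hin, if_pos hin]
        · rw [if_neg hin, if_neg hin]
          have hlnot : lso ∉ xs := by
            simpa [List.contains_eq_mem] using hin
          -- low side
          have hlow : xs.countP (fun x => x < lso && !(xs.contains (x + 1)))
              = runCount (srt.filter (fun o => decide (o < lso))) := by
            rw [countP_perm_contains hsperm (fun x => decide (x < lso))]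
            rw [countP_side_eq (l := srt) (fun x => decide (x < lso)) ?_,
              countP_runEnds (hstrict.filter _)]
            intro x hq
            simp only [decide_eq_true_eq] at hq
            simp only [List.contains_eq_mem, decide_eq_decide, List.mem_filter,
              decide_eq_true_eq]
            constructor
            · exact fun h => h.1
            · intro h
              refine ⟨h, ?_⟩
              have hxl : x + 1 ≠ lso := by
                intro hEq
                exact hlnot (hEq ▸ hsperm.mem_iff.mp h)
              omega
          -- high side
          have hhigh : xs.countP (fun x => lso < x && !(xs.contains (x + 1)))
              = runCount (srt.filter (fun o => decide (lso < o))) := by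
            rw [countP_perm_contains hsperm (fun x => decide (lso < x))]
            rw [countP_side_eq (l := srt) (fun x => decide (lso < x)) ?_,
              countP_runEnds (hstrict.filter _)]
            intro x hq
            simp only [decide_eq_true_eq] at hq
            simp only [List.contains_eq_mem, decide_eq_decide, List.mem_filter,
              decide_eq_true_eq]
            constructor
            · exact fun h => h.1
            · intro h
              exact ⟨h, by omega⟩
          have hL := side_iff_le_one (l := srt.filter (fun o => decide (o < lso))) (hstrict.filter _)
          have hR := side_iff_le_one (l := srt.filter (fun o => decide (lso < o))) (hstrict.filter _)
          rw [hlow, hhigh, ← hL, ← hR]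
          generalize (srt.filter (fun o => decide (o < lso)) != [] &&
              srt.filter (fun o => decide (o < lso)) !=
                PySem.List.pyRange (srt.filter (fun o => decide (o < lso))).head!
                  ((srt.filter (fun o => decide (o < lso))).getLast! + 1) 1) = b1
          generalize (srt.filter (fun o => decide (lso < o)) != [] &&
              srt.filter (fun o => decide (lso < o)) !=
                PySem.List.pyRange (srt.filter (fun o => decide (lso < o))).head!
                  ((srt.filter (fun o => decide (lso < o))).getLast! + 1) 1) = b2
          cases b1 <;> cases b2 <;> simp
      · rw [if_neg h4, if_neg h4]
        exact hfull
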